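-- pv_equiv track=rewrite | github.com/ColeSlawBecky/pythonPractice | hw8.py | alt
-- ===== SOURCE A (Python) =====
-- def alt( s1, s2 ):
--     'returns a string that is the result of alternating the letters of s1 and s2'
--     if len(s1) == 0 and len(s2) == 0:
--         return ''
--     elif len(s1) == 0:
--         return s2[:]
--     elif len(s2) == 0:
--         return s1[:]
--     else:
--         return s1[0] + s2[0] + alt( s1[1:], s2[1:] )
-- ===== SOURCE B (Python) =====
-- def alt(s1, s2):
--     'returns a string that is the result of alternating the letters of s1 and s2'
--     res = []
--     i = 0
--     while i < len(s1) and i < len(s2):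
--         res.append(s1[i])
--         res.append(s2[i])
--         i += 1
--     return ''.join(res) + s1[i:] + s2[i:]
-- ===== Notes on version B (the rewrite author's own statement) =====
-- stated objective: faster
-- what changed: Replaces A's linear recursion with fresh slice-and-concatenate at every step by an iterative index loop accumulating characters into a list, joined once, with the leftover suffix appended at the end.
import Mathlib
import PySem

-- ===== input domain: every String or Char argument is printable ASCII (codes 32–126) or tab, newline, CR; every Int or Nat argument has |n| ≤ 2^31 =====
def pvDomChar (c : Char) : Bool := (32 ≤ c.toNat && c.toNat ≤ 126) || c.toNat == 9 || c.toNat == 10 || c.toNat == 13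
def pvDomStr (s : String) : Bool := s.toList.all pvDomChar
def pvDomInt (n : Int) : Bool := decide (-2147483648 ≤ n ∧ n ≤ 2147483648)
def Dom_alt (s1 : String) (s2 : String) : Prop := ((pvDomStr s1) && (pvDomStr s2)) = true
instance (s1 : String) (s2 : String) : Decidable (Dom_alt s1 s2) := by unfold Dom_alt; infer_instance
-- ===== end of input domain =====

-- B replaces A's slice-and-recurse with one iterative index loop plus a suffix append (faster: O(n) vs A's O(n^2) slicing).


-- ===== PORT A =====
-- A's recursion: base cases on emptiness, else head of each plus recursive call on the tails (s1[1:], s2[1:]).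
def altA : List Char → List Char → List Char
  | [], [] => []
  | [], l2 => l2
  | l1, [] => l1
  | c1 :: t1, c2 :: t2 => c1 :: c2 :: altA t1 t2

def alt (s1 : String) (s2 : String) : String :=
  String.ofList (altA s1.toList s2.toList)

-- ===== PORT B =====
-- B's while-loop: index i, accumulator res; then res ++ s1[i:] ++ s2[i:].
def altLoop (l1 l2 : List Char) (i : Nat) (res : List Char) : List Char :=
  if i < l1.length ∧ i < l2.length then
    altLoop l1 l2 (i + 1) (res ++ [l1.getD i ' ', l2.getD i ' '])
  else
    res ++ l1.drop i ++ l2.drop i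
termination_by l1.length - i

def alt_alt (s1 : String) (s2 : String) : String :=
  String.ofList (altLoop s1.toList s2.toList 0 [])

-- ===== PRECONDITION & SPEC =====
def Spec_alt (s1 : String) (s2 : String) (out : String) : Prop := out = alt_alt s1 s2
instance (s1 : String) (s2 : String) (out : String) : Decidable (Spec_alt s1 s2 out) := by unfold Spec_alt; infer_instance

-- ===== CLAIM (what is proved, stated in full; the proofs are below) =====
def Claim_equal_alt : Prop := ∀ (s1 : String) (s2 : String), Dom_alt s1 s2 → Spec_alt s1 s2 (alt s1 s2)

-- ===== LEMMAS AND PROOFS =====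
theorem altA_nil_right (l1 : List Char) : altA l1 [] = l1 := by
  cases l1 <;> rfl

theorem altLoop_eq (l1 l2 : List Char) (i : Nat) (res : List Char) :
    altLoop l1 l2 i res = res ++ altA (l1.drop i) (l2.drop i) := by
  by_cases h : i < l1.length ∧ i < l2.length
  · rw [altLoop, if_pos h, altLoop_eq]
    obtain ⟨h1, h2⟩ := h
    rw [List.drop_eq_getElem_cons h1, List.drop_eq_getElem_cons h2]
    simp [altA, List.getD, h1, h2]
  · rw [altLoop, if_neg h]
    rcases Nat.lt_or_ge i l1.length with h1 | h1
    · have h2 : l2.length ≤ i := by omega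
      rw [List.drop_eq_nil_of_le h2, altA_nil_right, List.append_nil]
    · rw [List.drop_eq_nil_of_le h1]
      cases hd : l2.drop i <;> simp [altA]
termination_by l1.length - i

-- ===== VERDICT (by name: the statement is the Claim_ definition above) =====
theorem alt_spec : Claim_equal_alt := by
  intro s1 s2 _
  unfold Spec_alt alt alt_alt
  rw [altLoop_eq]
  simp
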